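-- pv_equiv track=rewrite | github.com/Harahan/BUAA-discrete-mathematics-2-2022 | basic_problem.py | augment_paths
-- ===== SOURCE A (Python) =====
-- def saturated_V(path):
-- 	Vs = set(path)
-- 	return Vs
--
-- def unsaturated_V(V, Vs):
-- 	Vu = V - Vs
-- 	return Vu
--
-- def augment_path(Vu, Eu, path):
-- 	v0 = path[0]
-- 	un = path[-1]
-- 	u0 = -1
-- 	vn = -1
-- 	for (u, v) in Eu:
-- 		if v == v0 and u in Vu:
-- 			u0 = u
-- 		if u == v0 and v in Vu:
-- 			u0 = v
-- 	for (u, v) in Eu: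
-- 		if v == un and u in Vu:
-- 			vn = u
-- 		if u == un and v in Vu:
-- 			vn = v
-- 	if u0 != -1 and vn != -1:
-- 		path = [u0] + path + [vn]
-- 	return path
--
-- def augment_paths(V, E, path):
-- 	Vs = saturated_V(path)
-- 	Vu = unsaturated_V(V, Vs)
-- 	Eu = E
-- 	m = 0
-- 	while len(path) != m:
-- 		m = len(path)
-- 		path = augment_path(Vu, Eu, path)
-- 		Vs = saturated_V(path)
-- 		Vu = unsaturated_V(V, Vs)
-- 	return path
-- ===== SOURCE B (Python) =====
-- def augment_paths(V, E, path):
-- 	# Index edges by incident vertex once; each round only the two endpoints'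
-- 	# neighbor lists are scanned (reversed, so the LAST matching edge wins, as in A).
-- 	adj = {}
-- 	for (u, v) in E:
-- 		adj.setdefault(v, []).append(u)
-- 		adj.setdefault(u, []).append(v)
-- 	Vset = set(V)
-- 	path = list(path)
-- 	in_path = set(path)
--
-- 	def pick(x):
-- 		for w in reversed(adj.get(x, [])):
-- 			if w in Vset and w not in in_path:
-- 				return w
-- 		return -1
--
-- 	while path:
-- 		u0 = pick(path[0])
-- 		vn = pick(path[-1])
-- 		if u0 == -1 or vn == -1:
-- 			break
-- 		path = [u0] + path + [vn]
-- 		in_path.add(u0)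
-- 		in_path.add(vn)
-- 	return path
-- ===== Notes on version B (the rewrite author's own statement) =====
-- stated objective: faster
-- what changed: A rescans the entire edge list twice per augmentation round; B builds a vertex-indexed adjacency map once and each round scans only the two endpoints' neighbor lists in reverse (preserving A's last-match choice), with an incrementally maintained saturated-vertex set instead of recomputing V - set(path).
import Mathlib
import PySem

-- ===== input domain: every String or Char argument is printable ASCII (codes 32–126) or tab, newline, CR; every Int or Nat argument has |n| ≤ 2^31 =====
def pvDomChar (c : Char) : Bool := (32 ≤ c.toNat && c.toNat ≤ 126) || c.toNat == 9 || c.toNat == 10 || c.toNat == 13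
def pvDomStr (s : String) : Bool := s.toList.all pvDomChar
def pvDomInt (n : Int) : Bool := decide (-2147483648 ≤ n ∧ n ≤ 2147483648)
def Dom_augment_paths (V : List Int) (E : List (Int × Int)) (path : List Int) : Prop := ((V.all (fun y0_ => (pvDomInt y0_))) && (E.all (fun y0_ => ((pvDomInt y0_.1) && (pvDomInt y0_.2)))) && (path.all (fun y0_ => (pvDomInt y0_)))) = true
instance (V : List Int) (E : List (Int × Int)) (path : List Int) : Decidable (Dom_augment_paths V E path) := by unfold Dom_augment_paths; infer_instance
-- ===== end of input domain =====

-- B replaces A's per-round scan of the whole edge list by a vertex-indexed adjacency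
-- map built once, scanning only the two endpoints' neighbor lists each round (asymptotic speed-up).
-- Both ports use explicit fuel (V.length + 2) only to make the loop total; the Python
-- loops always terminate within that many iterations.

-- ===== PORT A =====
-- saturated_V(path) = set(path); unsaturated_V(V, Vs) = V - Vs
def pvSatV (path : List Int) : PySem.Set Int := PySem.Set.ofList path

def pvUnsatV (V : PySem.Set Int) (Vs : PySem.Set Int) : PySem.Set Int := PySem.Set.diff V Vs

-- augment_path(Vu, Eu, path); the `| _, _ => path` arm is Python's IndexError on an
-- empty path, unreachable because the caller's loop never runs on an empty path
def pvAugmentPath (Vu : PySem.Set Int) (Eu : List (Int × Int)) (path : List Int) : List Int :=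
  match PySem.List.pyGet? path 0, PySem.List.pyGet? path (-1) with
  | some v0, some un =>
      let u0 := Eu.foldl (fun u0 e =>
        let u0 := if e.2 == v0 && Vu.contains e.1 then e.1 else u0
        if e.1 == v0 && Vu.contains e.2 then e.2 else u0) (-1)
      let vn := Eu.foldl (fun vn e =>
        let vn := if e.2 == un && Vu.contains e.1 then e.1 else vn
        if e.1 == un && Vu.contains e.2 then e.2 else vn) (-1)
      if u0 ≠ -1 ∧ vn ≠ -1 then [u0] ++ path ++ [vn] else path
  | _, _ => path

-- the `while len(path) != m` loop; state (m, Vu, path) exactly as in A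
def pvALoop (V : List Int) (E : List (Int × Int)) : Nat → Nat → PySem.Set Int → List Int → List Int
  | 0, _, _, path => path
  | fuel+1, m, Vu, path =>
      if path.length ≠ m then
        let m' := path.length
        let path' := pvAugmentPath Vu E path
        let Vs := pvSatV path'
        let Vu' := pvUnsatV V Vs
        pvALoop V E fuel m' Vu' path'
      else path

def augment_paths (V : List Int) (E : List (Int × Int)) (path : List Int) : List Int :=
  let Vs := pvSatV path
  let Vu := pvUnsatV V Vs
  pvALoop V E (V.length + 2) 0 Vu path

-- ===== PORT B =====
-- adjacency index: for (u,v) in E: adj.setdefault(v,[]).append(u); adj.setdefault(u,[]).append(v)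
def pvAdj (E : List (Int × Int)) : PySem.Dict Int (List Int) :=
  E.foldl (fun d e =>
    let d := d.insert e.2 (d.getD e.2 [] ++ [e.1])
    d.insert e.1 (d.getD e.1 [] ++ [e.2])) PySem.Dict.empty

-- `for w in reversed(adj.get(x, [])): if w in Vset and w not in in_path: return w; return -1`
def pvPickGo (Vset in_path : PySem.Set Int) : List Int → Int
  | [] => -1
  | w :: ws => if Vset.contains w && !(in_path.contains w) then w else pvPickGo Vset in_path ws

def pvPick (adj : PySem.Dict Int (List Int)) (Vset in_path : PySem.Set Int) (x : Int) : Int :=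
  pvPickGo Vset in_path ((adj.getD x []).reverse)

-- the `while path:` loop of B; state (in_path, path)
def pvBLoop (adj : PySem.Dict Int (List Int)) (Vset : PySem.Set Int) :
    Nat → PySem.Set Int → List Int → List Int
  | 0, _, path => path
  | fuel+1, in_path, path =>
      match PySem.List.pyGet? path 0, PySem.List.pyGet? path (-1) with
      | some v0, some un =>
          let u0 := pvPick adj Vset in_path v0
          let vn := pvPick adj Vset in_path un
          if u0 = -1 ∨ vn = -1 then path
          else pvBLoop adj Vset fuel ((in_path.add u0).add vn) ([u0] ++ path ++ [vn])
      | _, _ => path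

def augment_paths_alt (V : List Int) (E : List (Int × Int)) (path : List Int) : List Int :=
  let adj := pvAdj E
  let Vset := PySem.Set.ofList V
  let in_path := PySem.Set.ofList path
  pvBLoop adj Vset (V.length + 2) in_path path

-- ===== PRECONDITION & SPEC =====
def Spec_augment_paths (V : List Int) (E : List (Int × Int)) (path : List Int) (out : List Int) : Prop := out = augment_paths_alt V E path
instance (V : List Int) (E : List (Int × Int)) (path : List Int) (out : List Int) : Decidable (Spec_augment_paths V E path out) := by unfold Spec_augment_paths; infer_instance

-- ===== CLAIM (what is proved, stated in full; the proofs are below) =====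
def Claim_equal_augment_paths : Prop := ∀ (V : List Int) (E : List (Int × Int)) (path : List Int), Dom_augment_paths V E path → Spec_augment_paths V E path (augment_paths V E path)

-- ===== LEMMAS AND PROOFS =====

-- the neighbors of x contributed by one edge, in A's scan order (u first, then v)
def pvChunk (x : Int) (e : Int × Int) : List Int :=
  (if e.2 = x then [e.1] else []) ++ (if e.1 = x then [e.2] else [])

def pvNbrs (x : Int) (E : List (Int × Int)) : List Int := E.flatMap (pvChunk x)

-- B's adjacency dict at x lists exactly the neighbors in A's scan order
theorem pvAdj_getD (E : List (Int × Int)) (x : Int) (d : PySem.Dict Int (List Int)) :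
    (E.foldl (fun d e =>
      let d := d.insert e.2 (d.getD e.2 [] ++ [e.1])
      d.insert e.1 (d.getD e.1 [] ++ [e.2])) d).getD x [] = d.getD x [] ++ pvNbrs x E := by
  induction E generalizing d with
  | nil => simp [pvNbrs]
  | cons e E ih =>
      obtain ⟨u, v⟩ := e
      simp only [List.foldl_cons]
      rw [ih]
      simp only [PySem.Dict.getD_insert, pvNbrs, List.flatMap_cons, pvChunk]
      by_cases h1 : x = u
      · subst h1
        by_cases h2 : x = v
        · subst h2; simp
        · simp [h2, Ne.symm h2]
      · by_cases h2 : x = v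
        · subst h2; simp [h1, Ne.symm h1]
        · simp [h1, h2, Ne.symm h1, Ne.symm h2]

theorem pvAdj_getD' (E : List (Int × Int)) (x : Int) :
    (pvAdj E).getD x [] = pvNbrs x E := by
  simpa using pvAdj_getD E x PySem.Dict.empty

-- A's fold over the edge list is the "last satisfying neighbor" fold over pvNbrs
theorem pvFold_eq_nbrs (Vu : PySem.Set Int) (x : Int) (E : List (Int × Int)) (a : Int) :
    E.foldl (fun u0 e =>
        let u0 := if e.2 == x && Vu.contains e.1 then e.1 else u0
        if e.1 == x && Vu.contains e.2 then e.2 else u0) a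
      = (pvNbrs x E).foldl (fun a w => if Vu.contains w then w else a) a := by
  induction E generalizing a with
  | nil => simp [pvNbrs]
  | cons e E ih =>
      simp only [List.foldl_cons, ih, pvNbrs, List.flatMap_cons, List.foldl_append]
      congr 1
      by_cases h1 : e.1 = x <;> by_cases h2 : e.2 = x <;>
        simp [pvChunk, h1, h2]
-- "last satisfying" via foldl = "first satisfying on the reverse" with default a
def pvPickGoD (p : Int → Bool) : List Int → Int → Int
  | [], a => a
  | w :: ws, a => if p w then w else pvPickGoD p ws a

theorem pvPickGoD_append (p : Int → Bool) (xs : List Int) (w a : Int) :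
    pvPickGoD p (xs ++ [w]) a = pvPickGoD p xs (if p w then w else a) := by
  induction xs with
  | nil => rfl
  | cons y ys ih => simp only [List.cons_append, pvPickGoD, ih]

theorem pvFoldl_eq_pickGoD (p : Int → Bool) (l : List Int) (a : Int) :
    l.foldl (fun a w => if p w then w else a) a = pvPickGoD p l.reverse a := by
  induction l generalizing a with
  | nil => rfl
  | cons w ws ih => simp only [List.foldl_cons, ih, List.reverse_cons, pvPickGoD_append]

theorem pvPickGo_eq_pickGoD (Vset in_path : PySem.Set Int) (l : List Int) :
    pvPickGo Vset in_path l = pvPickGoD (fun w => Vset.contains w && !(in_path.contains w)) l (-1) := by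
  induction l with
  | nil => rfl
  | cons w ws ih => simp only [pvPickGo, pvPickGoD, ih]

-- membership tests agree: (V - set(path)).contains = Vset.contains && ! in_path.contains
theorem pvContains_eq (V : List Int) (path : List Int) (in_path : PySem.Set Int)
    (hip : ∀ w : Int, w ∈ in_path ↔ w ∈ path) (w : Int) :
    (pvUnsatV V (pvSatV path)).contains w
      = ((PySem.Set.ofList V).contains w && !(in_path.contains w)) := by
  have hip' := hip w
  by_cases hv : w ∈ V <;> by_cases hp : w ∈ path <;>
    simp [pvUnsatV, pvSatV, PySem.Set.mem_diff, PySem.Set.mem_ofList, hv, hp, hip']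

-- two "last satisfying" folds with pointwise-equal predicates agree
theorem pvFoldl_funext (c1 c2 : Int → Bool) (h : ∀ w, c1 w = c2 w) (l : List Int) (a : Int) :
    l.foldl (fun a w => if c1 w then w else a) a
      = l.foldl (fun a w => if c2 w then w else a) a := by
  rw [funext h]

-- A's chosen endpoint = B's pick, for any scan target x
theorem pvPick_eq (V : List Int) (E : List (Int × Int)) (path : List Int)
    (in_path : PySem.Set Int) (hip : ∀ w : Int, w ∈ in_path ↔ w ∈ path) (x : Int) :
    E.foldl (fun u0 e =>
        let u0 := if e.2 == x && (pvUnsatV V (pvSatV path)).contains e.1 then e.1 else u0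
        if e.1 == x && (pvUnsatV V (pvSatV path)).contains e.2 then e.2 else u0) (-1)
      = pvPick (pvAdj E) (PySem.Set.ofList V) in_path x := by
  rw [pvFold_eq_nbrs, pvPick, pvAdj_getD', pvPickGo_eq_pickGoD, ← pvFoldl_eq_pickGoD]
  exact pvFoldl_funext _ _ (pvContains_eq V path in_path hip) _ _

-- once the length matches m, A's loop returns the path unchanged (any fuel)
theorem pvALoop_fixed (V : List Int) (E : List (Int × Int)) (fuel : Nat)
    (Vu : PySem.Set Int) (path : List Int) :
    pvALoop V E fuel path.length Vu path = path := by
  cases fuel <;> simp [pvALoop]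

-- main loop correspondence: one A-iteration matches one B-iteration
theorem pvLoop_eq (V : List Int) (E : List (Int × Int)) (fuel : Nat) :
    ∀ (m : Nat) (path : List Int) (in_path : PySem.Set Int),
    (∀ w : Int, w ∈ in_path ↔ w ∈ path) → m ≠ path.length →
    pvALoop V E fuel m (pvUnsatV V (pvSatV path)) path
      = pvBLoop (pvAdj E) (PySem.Set.ofList V) fuel in_path path := by
  induction fuel with
  | zero => intro m path in_path _ _; rfl
  | succ fuel ih =>
      intro m path in_path hip hm
      rcases path with _ | ⟨q, rest⟩
      · -- empty path: A's augment_path leaves it empty, both loops return []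
        simp only [pvALoop, pvBLoop, pvAugmentPath,
          show PySem.List.pyGet? ([] : List Int) 0 = none from rfl,
          show PySem.List.pyGet? ([] : List Int) (-1) = none from rfl]
        split
        · exact pvALoop_fixed V E fuel _ []
        · rfl
      · have hne : q :: rest ≠ ([] : List Int) := by simp
        simp only [pvALoop, pvBLoop, pvAugmentPath, PySem.List.pyGet?_zero_cons,
          PySem.List.pyGet?_neg_one, List.getLast?_eq_some_getLast hne]
        rw [if_pos (fun h => hm h.symm)]
        rw [pvPick_eq V E (q :: rest) in_path hip q,
          pvPick_eq V E (q :: rest) in_path hip ((q :: rest).getLast hne)]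
        set u0 := pvPick (pvAdj E) (PySem.Set.ofList V) in_path q with hu0
        set vn := pvPick (pvAdj E) (PySem.Set.ofList V) in_path ((q :: rest).getLast hne) with hvn
        by_cases hstop : u0 = -1 ∨ vn = -1
        · rw [if_neg (by tauto), if_pos hstop]
          exact pvALoop_fixed V E fuel _ _
        · have h1 : u0 ≠ -1 := fun h => hstop (Or.inl h)
          have h2 : vn ≠ -1 := fun h => hstop (Or.inr h)
          rw [if_pos ⟨h1, h2⟩, if_neg hstop]
          exact ih (q :: rest).length ([u0] ++ (q :: rest) ++ [vn])
            ((in_path.add u0).add vn)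
            (by
              intro w
              simp only [PySem.Set.mem_add, hip w, List.mem_append, List.mem_cons]
              tauto)
            (by simp)

-- ===== VERDICT (by name: the statement is the Claim_ definition above) =====
theorem augment_paths_spec : Claim_equal_augment_paths := by
  intro V E path _
  show augment_paths V E path = augment_paths_alt V E path
  unfold augment_paths augment_paths_alt
  rcases path with _ | ⟨q, rest⟩
  · simp only [pvALoop, pvBLoop,
      show PySem.List.pyGet? ([] : List Int) 0 = none from rfl,
      show PySem.List.pyGet? ([] : List Int) (-1) = none from rfl]
    simp
  · exact pvLoop_eq V E (V.length + 2) 0 (q :: rest) (PySem.Set.ofList (q :: rest))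
      (fun w => PySem.Set.mem_ofList _ w) (by simp)
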